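-- pv_equiv track=rewrite | github.com/Trofmann/InformationProtection | lab9_2/coder.py | _split_to_blocks
-- ===== SOURCE A (Python) =====
-- from typing import List, Generator
--
-- def _split_to_blocks(list_: List[int], block_len=8) -> Generator[List[int], None, None]:
--     block = []
--     for elem in list_:
--         block.append(elem)
--         if len(block) == block_len:
--             temp = block
--             block = []
--             yield temp
-- ===== SOURCE B (Python) =====
-- from typing import List, Generator
--
--
-- def _split_to_blocks(list_: List[int], block_len=8) -> Generator[List[int], None, None]:
--     if block_len > 0:
--         for i in range(len(list_) // block_len):
--             yield list_[i * block_len:(i + 1) * block_len]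
-- ===== Notes on version B (the rewrite author's own statement) =====
-- stated objective: simpler
-- what changed: B computes the number of complete blocks with integer division and yields each block by index slicing (bulk C-level slice copies instead of per-element appends and a length test per element), instead of appending into a running buffer; for block_len <= 0 it yields nothing, matching A (whose buffer length never equals a non-positive block_len).
import Mathlib
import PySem

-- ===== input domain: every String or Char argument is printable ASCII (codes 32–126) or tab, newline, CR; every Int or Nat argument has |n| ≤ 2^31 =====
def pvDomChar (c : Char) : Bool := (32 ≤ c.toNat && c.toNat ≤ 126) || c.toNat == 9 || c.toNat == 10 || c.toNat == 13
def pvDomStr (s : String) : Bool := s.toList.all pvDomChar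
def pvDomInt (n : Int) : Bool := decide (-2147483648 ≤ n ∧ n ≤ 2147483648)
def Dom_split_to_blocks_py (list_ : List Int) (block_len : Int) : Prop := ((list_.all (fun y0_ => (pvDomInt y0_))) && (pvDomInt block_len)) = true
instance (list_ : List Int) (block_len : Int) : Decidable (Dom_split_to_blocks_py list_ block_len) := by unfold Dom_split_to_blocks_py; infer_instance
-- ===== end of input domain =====

-- B replaces A's element-at-a-time buffer accumulation by range-based index slicing (simpler decomposition; return-value equivalence).


-- ===== PORT A =====
-- A: append each element to a buffer; when the buffer's length hits block_len, emit it and reset.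
def split_to_blocks_py (list_ : List Int) (block_len : Int) : List (List Int) :=
  (list_.foldl
    (fun (s : List (List Int) × List Int) elem =>
      let block := s.2 ++ [elem]
      if (block.length : Int) = block_len then (s.1 ++ [block], [])
      else (s.1, block))
    ([], [])).1

-- ===== PORT B =====
-- B: count complete blocks with floor division, slice each block out by index.
def split_to_blocks_py_alt (list_ : List Int) (block_len : Int) : List (List Int) :=
  if block_len > 0 then
    (PySem.List.pyRange 0 (PySem.Int.floordiv (list_.length : Int) block_len) 1).map
      (fun i => PySem.List.slice list_ (some (i * block_len)) (some ((i + 1) * block_len)))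
  else []

-- ===== PRECONDITION & SPEC =====
def Spec_split_to_blocks_py (list_ : List Int) (block_len : Int) (out : List (List Int)) : Prop := out = split_to_blocks_py_alt list_ block_len
instance (list_ : List Int) (block_len : Int) (out : List (List Int)) : Decidable (Spec_split_to_blocks_py list_ block_len out) := by unfold Spec_split_to_blocks_py; infer_instance

-- ===== CLAIM (what is proved, stated in full; the proofs are below) =====
def Claim_equal_split_to_blocks_py : Prop := ∀ (list_ : List Int) (block_len : Int), Dom_split_to_blocks_py list_ block_len → Spec_split_to_blocks_py list_ block_len (split_to_blocks_py list_ block_len)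

-- ===== LEMMAS AND PROOFS =====

-- Reference chunking: successive complete blocks of size k, trailing partial block discarded.
def pvChunks (k : Nat) (l : List Int) : List (List Int) :=
  if _h : 0 < k ∧ k ≤ l.length then
    l.take k :: pvChunks k (l.drop k)
  else []
termination_by l.length
decreasing_by
  simp only [List.length_drop]; omega

-- A's loop step.
def pvStepA (block_len : Int) (s : List (List Int) × List Int) (elem : Int) :
    List (List Int) × List Int :=
  let block := s.2 ++ [elem]
  if (block.length : Int) = block_len then (s.1 ++ [block], [])
  else (s.1, block)

theorem pvA_eq_foldl (list_ : List Int) (block_len : Int) :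
    split_to_blocks_py list_ block_len = (list_.foldl (pvStepA block_len) ([], [])).1 := rfl

-- When block_len ≤ 0, the buffer length (≥ 1 at each test) never equals block_len: nothing is emitted.
theorem pvA_nonpos (block_len : Int) (hk : block_len ≤ 0) :
    ∀ (l : List Int) (acc : List (List Int)) (b : List Int),
      (l.foldl (pvStepA block_len) (acc, b)).1 = acc := by
  intro l
  induction l with
  | nil => intro acc b; rfl
  | cons e t ih =>
      intro acc b
      simp only [List.foldl_cons, pvStepA]
      rw [if_neg (by simp only [List.length_append, List.length_cons, List.length_nil]; push_cast; omega)]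
      exact ih acc (b ++ [e])

-- Invariant of A's loop for positive block size k.
theorem pvA_invariant (k : Nat) (hk : 0 < k) :
    ∀ (l : List Int) (acc : List (List Int)) (b : List Int), b.length < k →
      (l.foldl (pvStepA (k : Int)) (acc, b)).1 = acc ++ pvChunks k (b ++ l) := by
  intro l
  induction l with
  | nil =>
      intro acc b hb
      rw [pvChunks]
      simp only [List.append_nil]
      rw [dif_neg (by omega)]
      simp
  | cons e t ih =>
      intro acc b hb
      simp only [List.foldl_cons, pvStepA]
      by_cases h : ((b ++ [e]).length : Int) = (k : Int)
      · rw [if_pos h]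
        have hlen : (b ++ [e]).length = k := by exact_mod_cast h
        rw [ih (acc ++ [b ++ [e]]) [] (by simpa using hk)]
        -- take_left'/drop_left' split off the full first block exactly because its length is k
        have hR : pvChunks k (b ++ [e] ++ t) = (b ++ [e]) :: pvChunks k t := by
          rw [pvChunks, dif_pos ⟨hk, by rw [List.length_append, hlen]; omega⟩,
              List.take_left' hlen, List.drop_left' hlen]
        have hsplit : b ++ e :: t = b ++ [e] ++ t := by simp
        rw [hsplit, hR]
        simp
      · rw [if_neg h]
        have hlt : (b ++ [e]).length < k := by
          have : (b ++ [e]).length ≤ k := by simp at hb ⊢; omega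
          rcases lt_or_eq_of_le this with h' | h'
          · exact h'
          · exact absurd (by exact_mod_cast h' : ((b ++ [e]).length : Int) = (k : Int)) h
        rw [ih acc (b ++ [e]) hlt]
        simp

-- Drop/take closed form of B's slices equals the reference chunking.
theorem pvB_chunks (k : Nat) (hk : 0 < k) :
    ∀ (n : Nat) (l : List Int), l.length / k = n →
      (List.range n).map (fun i => (l.drop (i * k)).take k) = pvChunks k l := by
  intro n
  induction n with
  | zero =>
      intro l hn
      rw [pvChunks, dif_neg]
      · simp
      · intro ⟨_, hle⟩
        have := Nat.one_le_div_iff hk |>.mpr hle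
        omega
  | succ m ih =>
      intro l hn
      have hle : k ≤ l.length := by
        by_contra h
        rw [Nat.div_eq_of_lt (by omega)] at hn
        omega
      rw [pvChunks, dif_pos ⟨hk, hle⟩]
      rw [List.range_succ_eq_map]
      have hdrop : (l.drop k).length / k = m := by
        have h1 : l.length = k + (l.length - k) := by omega
        rw [h1, Nat.add_div_left _ hk] at hn
        simp only [List.length_drop]
        omega
      rw [← ih (l.drop k) hdrop]
      simp only [List.map_cons, List.map_map, Nat.zero_mul, List.drop_zero]
      congr 1
      apply List.map_congr_left
      intro i _
      simp only [Function.comp_apply, List.drop_drop, Nat.succ_eq_add_one]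
      congr 2
      ring

-- ===== VERDICT (by name: the statement is the Claim_ definition above) =====
theorem split_to_blocks_py_spec : Claim_equal_split_to_blocks_py := by
  intro list_ block_len _
  unfold Spec_split_to_blocks_py split_to_blocks_py_alt
  by_cases hpos : block_len > 0
  · rw [if_pos hpos]
    set k : Nat := block_len.toNat with hkdef
    have hk : 0 < k := by omega
    have hcast : block_len = (k : Int) := by omega
    rw [pvA_eq_foldl, hcast, pvA_invariant k hk list_ [] [] (by simpa using hk)]
    simp only [List.nil_append]
    rw [← pvB_chunks k hk (list_.length / k) list_ rfl]
    rw [PySem.Int.floordiv_natCast, PySem.List.pyRange_one]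
    simp only [Int.sub_zero, Int.toNat_natCast, List.map_map]
    apply List.map_congr_left
    intro i _
    simp only [Function.comp_apply]
    have h2 : ((0 : Int) + (i : Int)) * (k : Int) = ((i * k : Nat) : Int) := by push_cast; ring
    have h3 : ((0 : Int) + (i : Int) + 1) * (k : Int) = ((i * k : Nat) : Int) + ((k : Nat) : Int) := by
      push_cast; ring
    rw [h2, h3, PySem.List.slice_natCast_add]
  · rw [if_neg hpos, pvA_eq_foldl, pvA_nonpos block_len (by omega) list_ [] []]
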